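-- pv_equiv track=rewrite | github.com/fx4100/shitcrypt | shit.py | _worker_encrypt_full
-- ===== SOURCE A (Python) =====
-- MUL = 0x9E3779B1
--
-- MASK32 = 0xFFFFFFFF
--
-- def rotl32(x, r):
--     r &= 31
--     return ((x << r) & MASK32) | ((x & MASK32) >> (32 - r))
--
-- def _worker_encrypt_full(args):
--     # args: (words_slice, start_index, key_words, rounds)
--     words_slice, start_index, key_words, rounds = args
--     kwlen = len(key_words)
--     out = list(words_slice)  # copy
--     # do all rounds locally to minimize ipc and maximize CPU usage
--     for r in range(rounds):
--         kr = key_words[r % kwlen]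
--         add_base = (kr ^ ((r << 16) & MASK32)) & MASK32
--         # process each element
--         for i in range(len(out)):
--             idx = start_index + i
--             k1 = key_words[(idx + r) % kwlen]
--             rot = ((k1 >> (r % 16)) & 31)
--             w = out[i]
--             w = (w ^ k1) & MASK32
--             w = (w * MUL) & MASK32
--             w = (w + (add_base & MASK32)) & MASK32
--             w = rotl32(w, rot)
--             out[i] = w
--     return out
-- ===== SOURCE B (Python) =====
-- MUL = 0x9E3779B1
--
-- MASK32 = 0xFFFFFFFF
--
-- def rotl32(x, r):
--     r &= 31
--     return ((x << r) & MASK32) | ((x & MASK32) >> (32 - r))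
--
-- def _encrypt_word(w, idx, key_words, kwlen, rounds):
--     # fully encrypt ONE word through all rounds
--     for r in range(rounds):
--         kr = key_words[r % kwlen]
--         add_base = (kr ^ ((r << 16) & MASK32)) & MASK32
--         k1 = key_words[(idx + r) % kwlen]
--         rot = ((k1 >> (r % 16)) & 31)
--         w = (w ^ k1) & MASK32
--         w = (w * MUL) & MASK32
--         w = (w + (add_base & MASK32)) & MASK32
--         w = rotl32(w, rot)
--     return w
--
-- def _worker_encrypt_full(args):
--     # args: (words_slice, start_index, key_words, rounds)
--     words_slice, start_index, key_words, rounds = args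
--     kwlen = len(key_words)
--     return [_encrypt_word(w, start_index + i, key_words, kwlen, rounds)
--             for i, w in enumerate(words_slice)]
-- ===== Notes on version B (the rewrite author's own statement) =====
-- stated objective: alternative
-- what changed: B replaces A's round-major nested loops that repeatedly mutate the whole output list with a word-major decomposition: a helper fully encrypts a single word through all rounds, and the result is built in one comprehension over enumerate(words_slice) (loop interchange, no list mutation).
import Mathlib
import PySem

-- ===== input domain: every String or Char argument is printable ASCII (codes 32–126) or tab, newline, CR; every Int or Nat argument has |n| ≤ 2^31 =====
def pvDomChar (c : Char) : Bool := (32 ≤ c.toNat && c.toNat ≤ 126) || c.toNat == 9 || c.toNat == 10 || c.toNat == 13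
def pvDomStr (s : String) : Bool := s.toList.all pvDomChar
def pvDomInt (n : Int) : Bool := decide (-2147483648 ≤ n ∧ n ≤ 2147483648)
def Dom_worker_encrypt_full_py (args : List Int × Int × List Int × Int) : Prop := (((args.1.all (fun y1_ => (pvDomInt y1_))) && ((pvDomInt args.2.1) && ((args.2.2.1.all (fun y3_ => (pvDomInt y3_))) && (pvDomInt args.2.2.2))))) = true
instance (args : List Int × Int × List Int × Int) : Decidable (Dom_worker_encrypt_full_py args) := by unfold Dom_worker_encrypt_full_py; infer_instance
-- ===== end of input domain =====

-- B re-decomposes A word-major: a helper encrypts one word through all rounds and the result is one map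
-- over enumerate(words_slice); return values agree on Pre_ (A mutates a fresh copy only, no observable side effects).

-- shared module-level helper rotl32 (both Pythons use it). Shift counts are Nats in Lean; `r &= 31` makes
-- 0 ≤ r2 ≤ 31, so `.toNat` on r2 and 32 - r2 is exact.
def rotl32_port (x r : Int) : Int :=
  let r2 := PySem.Int.band r 31
  PySem.Int.bor (PySem.Int.band (x <<< r2.toNat) 0xFFFFFFFF)
    ((PySem.Int.band x 0xFFFFFFFF) >>> ((32 - r2).toNat))

-- ===== PORT A =====
-- key_words[e] with e = r % kwlen, (idx+r) % kwlen: under Pre_ (kwlen > 0) 0 ≤ e < kwlen, so pyGetD _ _ 0 is exact;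
-- out[i] read/write for i in range(len(out)) is pyGetD/pySetD; r ≥ 0 inside range(rounds), so (r % 16).toNat is exact.
def worker_encrypt_full_py (args : List Int × Int × List Int × Int) : List Int :=
  let words_slice := args.1
  let start_index := args.2.1
  let key_words := args.2.2.1
  let rounds := args.2.2.2
  let kwlen := PySem.List.len key_words
  (PySem.List.pyRange 0 rounds 1).foldl (fun out r =>
    let kr := PySem.List.pyGetD key_words (PySem.Int.mod r kwlen) 0
    let add_base := PySem.Int.band (PySem.Int.bxor kr (PySem.Int.band (r <<< 16) 0xFFFFFFFF)) 0xFFFFFFFF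
    (PySem.List.pyRange 0 (PySem.List.len out) 1).foldl (fun out i =>
      let idx := start_index + i
      let k1 := PySem.List.pyGetD key_words (PySem.Int.mod (idx + r) kwlen) 0
      let rot := PySem.Int.band (k1 >>> (PySem.Int.mod r 16).toNat) 31
      let w := PySem.List.pyGetD out i 0
      let w := PySem.Int.band (PySem.Int.bxor w k1) 0xFFFFFFFF
      let w := PySem.Int.band (w * 0x9E3779B1) 0xFFFFFFFF
      let w := PySem.Int.band (w + PySem.Int.band add_base 0xFFFFFFFF) 0xFFFFFFFF
      let w := rotl32_port w rot
      PySem.List.pySetD out i w) out) words_slice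

-- ===== PORT B =====
def encrypt_word_port (w0 idx : Int) (key_words : List Int) (kwlen rounds : Int) : Int :=
  (PySem.List.pyRange 0 rounds 1).foldl (fun w r =>
    let kr := PySem.List.pyGetD key_words (PySem.Int.mod r kwlen) 0
    let add_base := PySem.Int.band (PySem.Int.bxor kr (PySem.Int.band (r <<< 16) 0xFFFFFFFF)) 0xFFFFFFFF
    let k1 := PySem.List.pyGetD key_words (PySem.Int.mod (idx + r) kwlen) 0
    let rot := PySem.Int.band (k1 >>> (PySem.Int.mod r 16).toNat) 31
    let w := PySem.Int.band (PySem.Int.bxor w k1) 0xFFFFFFFF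
    let w := PySem.Int.band (w * 0x9E3779B1) 0xFFFFFFFF
    let w := PySem.Int.band (w + PySem.Int.band add_base 0xFFFFFFFF) 0xFFFFFFFF
    rotl32_port w rot) w0

def worker_encrypt_full_py_alt (args : List Int × Int × List Int × Int) : List Int :=
  let words_slice := args.1
  let start_index := args.2.1
  let key_words := args.2.2.1
  let rounds := args.2.2.2
  let kwlen := PySem.List.len key_words
  (PySem.List.enumerate words_slice 0).map (fun p =>
    encrypt_word_port p.2 (start_index + p.1) key_words kwlen rounds)

-- ===== PRECONDITION & SPEC =====
-- Pre_ excludes exactly the inputs where Python A raises: rounds ≥ 1 with empty key_words hits r % 0 (ZeroDivisionError).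
def Pre_worker_encrypt_full_py (args : List Int × Int × List Int × Int) : Prop :=
  args.2.2.1 ≠ [] ∨ args.2.2.2 ≤ 0
instance (args : List Int × Int × List Int × Int) : Decidable (Pre_worker_encrypt_full_py args) := by unfold Pre_worker_encrypt_full_py; infer_instance
def pvWitness_worker_encrypt_full_py : (List Int × Int × List Int × Int) := ([7, -3], 5, [11, 2], 3)

def Spec_worker_encrypt_full_py (args : List Int × Int × List Int × Int) (out : List Int) : Prop := out = worker_encrypt_full_py_alt args
instance (args : List Int × Int × List Int × Int) (out : List Int) : Decidable (Spec_worker_encrypt_full_py args out) := by unfold Spec_worker_encrypt_full_py; infer_instance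

-- ===== CLAIM (what is proved, stated in full; the proofs are below) =====
def Claim_equal_worker_encrypt_full_py : Prop := ∀ (args : List Int × Int × List Int × Int), Dom_worker_encrypt_full_py args → Pre_worker_encrypt_full_py args → Spec_worker_encrypt_full_py args (worker_encrypt_full_py args)
-- ===== LEMMAS AND PROOFS =====

-- the common per-round, per-word scalar transform
def pvStep (key_words : List Int) (kwlen r idx w : Int) : Int :=
  let kr := PySem.List.pyGetD key_words (PySem.Int.mod r kwlen) 0
  let add_base := PySem.Int.band (PySem.Int.bxor kr (PySem.Int.band (r <<< 16) 0xFFFFFFFF)) 0xFFFFFFFF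
  let k1 := PySem.List.pyGetD key_words (PySem.Int.mod (idx + r) kwlen) 0
  let rot := PySem.Int.band (k1 >>> (PySem.Int.mod r 16).toNat) 31
  let w := PySem.Int.band (PySem.Int.bxor w k1) 0xFFFFFFFF
  let w := PySem.Int.band (w * 0x9E3779B1) 0xFFFFFFFF
  let w := PySem.Int.band (w + PySem.Int.band add_base 0xFFFFFFFF) 0xFFFFFFFF
  rotl32_port w rot

lemma pv_mapIdx_id : ∀ (xs : List Int), xs.mapIdx (fun _ w => w) = xs := by
  intro xs
  induction xs with
  | nil => rfl
  | cons x xs ih => simp [List.mapIdx_cons, ih]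

-- A's inner index loop, abstracted: set index i to g i (current value at i)
lemma pv_foldl_set_length (g : Int → Int → Int) :
    ∀ (l : List Int) (xs : List Int),
      (l.foldl (fun o i => PySem.List.pySetD o i (g i (PySem.List.pyGetD o i 0))) xs).length = xs.length := by
  intro l
  induction l with
  | nil => intro xs; rfl
  | cons i l ih =>
    intro xs
    simp only [List.foldl_cons, ih, PySem.List.length_pySetD]

lemma pv_foldl_set_append (g : Int → Int → Int) :
    ∀ (l : List Int) (xs : List Int) (z : Int),
      (∀ i ∈ l, 0 ≤ i ∧ i < (xs.length : Int)) →
      l.foldl (fun o i => PySem.List.pySetD o i (g i (PySem.List.pyGetD o i 0))) (xs ++ [z])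
        = (l.foldl (fun o i => PySem.List.pySetD o i (g i (PySem.List.pyGetD o i 0))) xs) ++ [z] := by
  intro l
  induction l with
  | nil => intro xs z _; rfl
  | cons i l ih =>
    intro xs z hb
    have hi := hb i (List.mem_cons_self ..)
    have hlt : i.toNat < xs.length := by omega
    simp only [List.foldl_cons]
    have hget : PySem.List.pyGetD (xs ++ [z]) i 0 = PySem.List.pyGetD xs i 0 := by
      rw [PySem.List.pyGetD_eq_getElem _ 0 hi.1 (by simp; omega),
          PySem.List.pyGetD_eq_getElem _ 0 hi.1 hi.2]
      exact List.getElem_append_left hlt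
    have hset : ∀ v, PySem.List.pySetD (xs ++ [z]) i v = PySem.List.pySetD xs i v ++ [z] := by
      intro v
      rw [PySem.List.pySetD_of_nonneg _ _ hi.1, PySem.List.pySetD_of_nonneg _ _ hi.1]
      exact List.set_append_left _ _ hlt
    rw [hget, hset]
    exact ih _ z (fun j hj => by
      have := hb j (List.mem_cons_of_mem _ hj)
      simpa [List.length_set] using this)

-- over range(len xs), A's index loop IS mapIdx
lemma pv_foldl_set_mapIdx (g : Int → Int → Int) :
    ∀ (xs : List Int),
      (PySem.List.pyRange 0 (PySem.List.len xs) 1).foldl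
          (fun o i => PySem.List.pySetD o i (g i (PySem.List.pyGetD o i 0))) xs
        = xs.mapIdx (fun k w => g (k : Int) w) := by
  intro xs
  induction xs using List.reverseRecOn with
  | nil => rfl
  | append_singleton xs z ih =>
    rw [show PySem.List.len (xs ++ [z]) = (xs.length : Int) + 1 from by simp [PySem.List.len_eq],
        PySem.List.pyRange_one_succ_right (Int.natCast_nonneg _), List.foldl_append,
        pv_foldl_set_append g _ xs z (fun i hi => PySem.List.mem_pyRange_one.mp hi)]
    have hflen : (List.foldl (fun o i => PySem.List.pySetD o i (g i (PySem.List.pyGetD o i 0)))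
        xs (PySem.List.pyRange 0 (↑xs.length) 1)).length = xs.length := pv_foldl_set_length g _ xs
    simp only [List.foldl_cons, List.foldl_nil]
    have hget : PySem.List.pyGetD
        (List.foldl (fun o i => PySem.List.pySetD o i (g i (PySem.List.pyGetD o i 0)))
          xs (PySem.List.pyRange 0 (↑xs.length) 1) ++ [z]) (↑xs.length) 0 = z := by
      rw [PySem.List.pyGetD_eq_getElem _ 0 (Int.natCast_nonneg _) (by simp [hflen])]
      simp [hflen]
    have hset : ∀ v, PySem.List.pySetD
        (List.foldl (fun o i => PySem.List.pySetD o i (g i (PySem.List.pyGetD o i 0)))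
          xs (PySem.List.pyRange 0 (↑xs.length) 1) ++ [z]) (↑xs.length) v
        = List.foldl (fun o i => PySem.List.pySetD o i (g i (PySem.List.pyGetD o i 0)))
          xs (PySem.List.pyRange 0 (↑xs.length) 1) ++ [v] := by
      intro v
      rw [PySem.List.pySetD_of_nonneg _ _ (Int.natCast_nonneg _)]
      simp only [Int.toNat_natCast]
      rw [List.set_append_right _ _ (by omega : (List.foldl (fun o i => PySem.List.pySetD o i (g i (PySem.List.pyGetD o i 0))) xs (PySem.List.pyRange 0 (↑xs.length) 1)).length ≤ xs.length)]
      simp [hflen]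
    rw [hget, hset]
    rw [PySem.List.len_eq] at ih
    rw [ih]
    simp

-- loop interchange: one per-index map per round = all rounds folded per index
lemma pv_foldl_mapIdx_comm (g : Int → Nat → Int → Int) :
    ∀ (rs : List Int) (xs : List Int),
      rs.foldl (fun out r => out.mapIdx (fun k w => g r k w)) xs
        = xs.mapIdx (fun k w => rs.foldl (fun w r => g r k w) w) := by
  intro rs
  induction rs with
  | nil =>
    intro xs
    simp only [List.foldl_nil]
    exact (pv_mapIdx_id xs).symm
  | cons r rs ih =>
    intro xs
    simp only [List.foldl_cons]
    rw [ih, List.mapIdx_mapIdx]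
    rfl

lemma pv_map_enumerate_mapIdx (h : Int → Int → Int) :
    ∀ (xs : List Int) (s : Int),
      (PySem.List.enumerate xs s).map (fun p => h p.1 p.2)
        = xs.mapIdx (fun k w => h (s + (k : Int)) w) := by
  intro xs
  induction xs with
  | nil => intro s; rfl
  | cons x xs ih =>
    intro s
    rw [PySem.List.enumerate_cons, List.map_cons, List.mapIdx_cons, ih (s + 1)]
    congr 1
    · simp
    · congr 1
      funext k w
      congr 1
      push_cast
      ring

-- ===== VERDICT (by name: the statement is the Claim_ definition above) =====
theorem worker_encrypt_full_py_spec : Claim_equal_worker_encrypt_full_py := by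
  unfold Claim_equal_worker_encrypt_full_py
  rintro ⟨ws, start, kw, rounds⟩ _ _
  unfold Spec_worker_encrypt_full_py
  have hA : worker_encrypt_full_py (ws, start, kw, rounds)
      = (PySem.List.pyRange 0 rounds 1).foldl
          (fun out r => out.mapIdx (fun k w => pvStep kw (PySem.List.len kw) r (start + (k : Int)) w)) ws := by
    have h0 : worker_encrypt_full_py (ws, start, kw, rounds)
        = (PySem.List.pyRange 0 rounds 1).foldl
            (fun out r => (PySem.List.pyRange 0 (PySem.List.len out) 1).foldl
              (fun o i => PySem.List.pySetD o i
                (pvStep kw (PySem.List.len kw) r (start + i) (PySem.List.pyGetD o i 0))) out) ws := rfl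
    rw [h0]
    congr 1
    funext out r
    exact pv_foldl_set_mapIdx _ out
  have hB : worker_encrypt_full_py_alt (ws, start, kw, rounds)
      = ws.mapIdx (fun k w =>
          encrypt_word_port w (start + ((0 : Int) + (k : Int))) kw (PySem.List.len kw) rounds) :=
    pv_map_enumerate_mapIdx
      (fun i w => encrypt_word_port w (start + i) kw (PySem.List.len kw) rounds) ws 0
  simp only [zero_add] at hB
  rw [hA, hB]
  exact pv_foldl_mapIdx_comm
    (fun r k w => pvStep kw (PySem.List.len kw) r (start + (k : Int)) w)
    (PySem.List.pyRange 0 rounds 1) ws
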